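-- pv_equiv track=rewrite | github.com/SigurdurVilhelmsson/namsbokasafn-efni | tools/convert_pandoc_tables.py | parse_column_boundaries
-- ===== SOURCE A (Python) =====
-- def parse_column_boundaries(separator_line: str) -> list[tuple[int, int]]:
--     """
--     Parse column boundaries from a separator line like:
--     '  ----------- ----------- --------------- -------------- ----------- ---------------'
--
--     Returns list of (start, end) tuples for each column.
--     """
--     boundaries = []
--     in_column = False
--     start = 0
--
--     for i, char in enumerate(separator_line):
--         if char == '-':
--             if not in_column:
--                 start = i
--                 in_column = True
--         else:
--             if in_column:
--                 boundaries.append((start, i))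
--                 in_column = False
--
--     # Handle trailing column
--     if in_column:
--         boundaries.append((start, len(separator_line)))
--
--     return boundaries
-- ===== SOURCE B (Python) =====
-- import re
--
-- def parse_column_boundaries(separator_line: str) -> list[tuple[int, int]]:
--     """Column boundaries = the (start, end) spans of maximal dash runs."""
--     return [(m.start(), m.end()) for m in re.finditer(r'-+', separator_line)]
-- ===== Notes on version B (the rewrite author's own statement) =====
-- stated objective: idiomatic
-- what changed: Replaced the manual in_column/start state machine (with a separate trailing-run fixup) by a single regex scan re.finditer(r'-+') that yields each maximal dash run's (start, end) directly.
import Mathlib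
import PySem

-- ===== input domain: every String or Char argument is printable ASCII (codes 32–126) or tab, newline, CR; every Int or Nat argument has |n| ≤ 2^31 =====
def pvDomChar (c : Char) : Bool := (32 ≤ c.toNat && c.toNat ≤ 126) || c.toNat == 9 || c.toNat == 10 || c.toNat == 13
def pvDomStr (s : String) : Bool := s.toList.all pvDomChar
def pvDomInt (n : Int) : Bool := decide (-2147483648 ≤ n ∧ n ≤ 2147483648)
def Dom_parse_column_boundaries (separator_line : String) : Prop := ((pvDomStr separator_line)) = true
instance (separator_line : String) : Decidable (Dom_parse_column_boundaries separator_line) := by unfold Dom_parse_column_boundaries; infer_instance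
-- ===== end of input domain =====

-- B replaces A's in_column/start state machine (plus trailing-run fixup) by a direct
-- scan for maximal dash runs (re.finditer(r'-+') in Python); objective: idiomatic.

-- ===== PORT A =====
-- the for-loop over enumerate(separator_line): state (boundaries, in_column, start)
def pcbLoop : List Char → Int → List (Int × Int) → Bool → Int → (List (Int × Int) × Bool × Int)
  | [], _, b, ic, st => (b, ic, st)
  | c :: rest, i, b, ic, st =>
    if c = '-' then
      if ic then pcbLoop rest (i + 1) b ic st
      else pcbLoop rest (i + 1) b true i
    else
      if ic then pcbLoop rest (i + 1) (b ++ [(st, i)]) false st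
      else pcbLoop rest (i + 1) b ic st

-- the trailing-column handling after the loop
def pcbFinish (r : List (Int × Int) × Bool × Int) (len : Int) : List (Int × Int) :=
  if r.2.1 then r.1 ++ [(r.2.2, len)] else r.1

def parse_column_boundaries (separator_line : String) : List (Int × Int) :=
  let cs := separator_line.toList
  pcbFinish (pcbLoop cs 0 [] false 0) (cs.length : Int)

-- ===== PORT B =====
-- hand port of re.finditer(r'-+', s): at each position, a maximal dash run yields one
-- (start, end) match and scanning resumes after it; exact for this pattern.
def pcbRuns : List Char → Int → List (Int × Int)
  | [], _ => []
  | c :: rest, i =>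
    if h : c = '-' then
      let n := ((c :: rest).takeWhile (fun x => x = '-')).length
      (i, i + (n : Int)) :: pcbRuns ((c :: rest).dropWhile (fun x => x = '-')) (i + (n : Int))
    else pcbRuns rest (i + 1)
  termination_by cs _ => cs.length
  decreasing_by
    · simp [List.dropWhile, h]
      exact List.length_dropWhile_le _ _
    · simp

def parse_column_boundaries_alt (separator_line : String) : List (Int × Int) :=
  pcbRuns separator_line.toList 0

-- ===== PRECONDITION & SPEC =====
def Spec_parse_column_boundaries (separator_line : String) (out : List (Int × Int)) : Prop := out = parse_column_boundaries_alt separator_line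
instance (separator_line : String) (out : List (Int × Int)) : Decidable (Spec_parse_column_boundaries separator_line out) := by unfold Spec_parse_column_boundaries; infer_instance

-- ===== CLAIM (what is proved, stated in full; the proofs are below) =====
def Claim_equal_parse_column_boundaries : Prop := ∀ (separator_line : String), Dom_parse_column_boundaries separator_line → Spec_parse_column_boundaries separator_line (parse_column_boundaries separator_line)

-- ===== LEMMAS AND PROOFS =====

theorem pcb_main (cs : List Char) : ∀ (i st : Int) (b : List (Int × Int)),
    pcbFinish (pcbLoop cs i b false st) (i + (cs.length : Int)) = b ++ pcbRuns cs i ∧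
    pcbFinish (pcbLoop cs i b true st) (i + (cs.length : Int)) =
      b ++ (st, i + ((cs.takeWhile (fun x => x = '-')).length : Int)) ::
        pcbRuns (cs.dropWhile (fun x => x = '-')) (i + ((cs.takeWhile (fun x => x = '-')).length : Int)) := by
  induction cs with
  | nil => intro i st b; simp [pcbLoop, pcbFinish, pcbRuns]
  | cons c rest ih =>
    intro i st b
    have e : ∀ n : Nat, i + ((n + 1 : Nat) : Int) = i + 1 + (n : Int) := fun n => by
      push_cast; ring
    by_cases h : c = '-'
    · constructor
      · rw [pcbRuns, dif_pos h]
        simp only [pcbLoop, h, if_pos, Bool.false_eq_true, if_false,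
          List.takeWhile_cons, List.dropWhile_cons, decide_true, List.length_cons]
        rw [e, e]
        exact (ih (i + 1) i b).2
      · simp only [pcbLoop, h, if_true, List.takeWhile_cons, List.dropWhile_cons,
          decide_true, List.length_cons]
        rw [e, e]
        exact (ih (i + 1) st b).2
    · have h' : ¬ (c = '-') := h
      constructor
      · rw [pcbRuns, dif_neg h]
        simp only [pcbLoop, if_neg h', Bool.false_eq_true, List.length_cons]
        rw [e]
        exact (ih (i + 1) st b).1
      · simp only [pcbLoop, List.takeWhile_cons, List.dropWhile_cons,
          h', decide_false, List.length_cons, Bool.false_eq_true, if_false, if_true]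
        rw [e]
        rw [(ih (i + 1) st (b ++ [(st, i)])).1]
        have hruns : pcbRuns (c :: rest) i = pcbRuns rest (i + 1) := by rw [pcbRuns, dif_neg h]
        simp [hruns]

-- ===== VERDICT (by name: the statement is the Claim_ definition above) =====
theorem parse_column_boundaries_spec : Claim_equal_parse_column_boundaries := by
  intro s _
  unfold Spec_parse_column_boundaries parse_column_boundaries parse_column_boundaries_alt
  have := (pcb_main s.toList 0 0 []).1
  simpa using this
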